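-- pv_equiv track=rewrite | github.com/koshimazaki/ComfyUI-Koshi-Nodes | nodes/flux_motion/core/schedule_parser.py | _expand_prompts
-- ===== SOURCE A (Python) =====
-- from typing import Dict, List, Optional, Any, Union
--
-- def _expand_prompts(prompts: Dict[int, str], num_frames: int) -> Dict[int, str]:
--     """Expand keyframe prompts to per-frame mapping."""
--     if not prompts:
--         return {}
--
--     result = {}
--     sorted_frames = sorted(prompts.keys())
--
--     current_prompt = None
--     for i in range(num_frames):
--         for kf in sorted_frames:
--             if kf <= i:
--                 current_prompt = prompts[kf]
--         if current_prompt: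
--             result[i] = current_prompt
--
--     return result
-- ===== SOURCE B (Python) =====
-- def _expand_prompts(prompts, num_frames):
--     """Expand keyframe prompts to per-frame mapping (single pass, advancing pointer)."""
--     result = {}
--     keys = sorted(prompts)
--     cur = None
--     j = 0
--     for i in range(num_frames):
--         while j < len(keys) and keys[j] <= i:
--             cur = prompts[keys[j]]
--             j += 1
--         if cur:
--             result[i] = cur
--     return result
-- ===== Notes on version B (the rewrite author's own statement) =====
-- stated objective: faster
-- what changed: Replaces the per-frame rescan of all sorted keyframes with a single advancing pointer over the sorted keys, carrying the current prompt across frames.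
import Mathlib
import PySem

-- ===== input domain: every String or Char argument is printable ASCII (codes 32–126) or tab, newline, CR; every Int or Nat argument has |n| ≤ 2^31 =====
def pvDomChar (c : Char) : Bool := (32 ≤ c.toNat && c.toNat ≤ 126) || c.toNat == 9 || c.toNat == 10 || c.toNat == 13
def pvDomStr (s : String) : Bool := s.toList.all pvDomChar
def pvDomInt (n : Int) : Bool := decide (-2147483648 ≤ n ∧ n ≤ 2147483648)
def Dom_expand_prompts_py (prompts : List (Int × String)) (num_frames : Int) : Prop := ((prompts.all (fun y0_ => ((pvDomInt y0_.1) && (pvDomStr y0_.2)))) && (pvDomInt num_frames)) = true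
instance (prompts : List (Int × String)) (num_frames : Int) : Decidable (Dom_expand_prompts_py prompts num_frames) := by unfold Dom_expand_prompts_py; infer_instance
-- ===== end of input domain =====

-- B replaces A's per-frame rescan of all sorted keyframes (O(F*K)) by a single
-- advancing pointer over the sorted keys (one pass over frames and keys).

-- shared port helper: Python's  `if current_prompt: result[i] = current_prompt`
def pvTruthySet (res : PySem.Dict Int String) (i : Int) (cur : Option String) :
    PySem.Dict Int String :=
  match cur with
  | some s => if s ≠ "" then res.insert i s else res
  | none => res

-- ===== PORT A =====
-- A's per-frame body: rescan ALL sorted keyframes, overwriting current_prompt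
def pvStepA (d : PySem.Dict Int String) (ks : List Int)
    (st : PySem.Dict Int String × Option String) (i : Int) :
    PySem.Dict Int String × Option String :=
  let cur := ks.foldl (fun c kf => if kf ≤ i then PySem.Dict.get? d kf else c) st.2
  (pvTruthySet st.1 i cur, cur)

def expand_prompts_py (prompts : List (Int × String)) (num_frames : Int) : List (Int × String) :=
  if prompts = [] then []
  else
    let d := PySem.Dict.mk prompts
    let sorted_frames := PySem.List.sorted (PySem.Dict.keys d) (fun k => k) false
    let st := (PySem.List.pyRange 0 num_frames 1).foldl (pvStepA d sorted_frames)
      (PySem.Dict.empty, none)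
    st.1.items

-- ===== PORT B =====
-- B's inner while: advance the pointer over the (remaining) sorted keys while key ≤ i
def pvAdvance (d : PySem.Dict Int String) (i : Int) :
    List Int → Option String → List Int × Option String
  | [], cur => ([], cur)
  | k :: rest, cur =>
    if k ≤ i then pvAdvance d i rest (PySem.Dict.get? d k) else (k :: rest, cur)

def pvStepB (d : PySem.Dict Int String)
    (st : PySem.Dict Int String × List Int × Option String) (i : Int) :
    PySem.Dict Int String × List Int × Option String :=
  let p := pvAdvance d i st.2.1 st.2.2
  (pvTruthySet st.1 i p.2, p.1, p.2)

def expand_prompts_py_alt (prompts : List (Int × String)) (num_frames : Int) : List (Int × String) :=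
  let d := PySem.Dict.mk prompts
  let keys := PySem.List.sorted (PySem.Dict.keys d) (fun k => k) false
  let st := (PySem.List.pyRange 0 num_frames 1).foldl (pvStepB d)
    (PySem.Dict.empty, keys, none)
  st.1.items

-- ===== PRECONDITION & SPEC =====
def Spec_expand_prompts_py (prompts : List (Int × String)) (num_frames : Int) (out : List (Int × String)) : Prop := out = expand_prompts_py_alt prompts num_frames
instance (prompts : List (Int × String)) (num_frames : Int) (out : List (Int × String)) : Decidable (Spec_expand_prompts_py prompts num_frames out) := by unfold Spec_expand_prompts_py; infer_instance

-- ===== CLAIM (what is proved, stated in full; the proofs are below) =====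
def Claim_equal_expand_prompts_py : Prop := ∀ (prompts : List (Int × String)) (num_frames : Int), Dom_expand_prompts_py prompts num_frames → Spec_expand_prompts_py prompts num_frames (expand_prompts_py prompts num_frames)

-- ===== LEMMAS AND PROOFS =====

-- a fold that ignores its accumulator only depends on it when the list is empty
lemma foldl_ignore_acc (d : PySem.Dict Int String) :
    ∀ (l : List Int) (c c' : Option String), l ≠ [] →
      l.foldl (fun _ k => PySem.Dict.get? d k) c =
      l.foldl (fun _ k => PySem.Dict.get? d k) c' := by
  intro l
  induction l with
  | nil => intro c c' h; exact absurd rfl h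
  | cons k rest _ =>
    intro c c' _
    rfl

-- when every key in the list is ≤ i, A's conditional overwrite is an unconditional one
lemma foldl_cond_all_le (d : PySem.Dict Int String) (i : Int) :
    ∀ (l : List Int) (c : Option String), (∀ k ∈ l, k ≤ i) →
      l.foldl (fun c kf => if kf ≤ i then PySem.Dict.get? d kf else c) c =
      l.foldl (fun _ k => PySem.Dict.get? d k) c := by
  intro l
  induction l with
  | nil => intro c _; rfl
  | cons k rest ih =>
    intro c h
    simp only [List.foldl_cons, if_pos (h k (by simp))]
    exact ih _ (fun x hx => h x (by simp [hx]))

-- when every key in the list is > i, A's conditional overwrite is the identity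
lemma foldl_cond_all_gt (d : PySem.Dict Int String) (i : Int) :
    ∀ (l : List Int) (c : Option String), (∀ k ∈ l, i < k) →
      l.foldl (fun c kf => if kf ≤ i then PySem.Dict.get? d kf else c) c = c := by
  intro l
  induction l with
  | nil => intro c _; rfl
  | cons k rest ih =>
    intro c h
    have hk : ¬ k ≤ i := not_le.mpr (h k (by simp))
    simp only [List.foldl_cons, hk, if_false]
    exact ih c (fun x hx => h x (by simp [hx]))

-- specification of B's while-loop (pvAdvance) on a sorted remainder
lemma advance_spec (d : PySem.Dict Int String) (i : Int) :
    ∀ (rem : List Int) (cur : Option String), rem.Pairwise (· ≤ ·) →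
      ∃ consumed,
        rem = consumed ++ (pvAdvance d i rem cur).1 ∧
        (∀ k ∈ consumed, k ≤ i) ∧
        (∀ k ∈ (pvAdvance d i rem cur).1, i < k) ∧
        (pvAdvance d i rem cur).2 =
          consumed.foldl (fun _ k => PySem.Dict.get? d k) cur := by
  intro rem
  induction rem with
  | nil => intro cur _; exact ⟨[], rfl, by simp, by simp [pvAdvance], rfl⟩
  | cons k rest ih =>
    intro cur hp
    by_cases hk : k ≤ i
    · obtain ⟨cons', h1, h2, h3, h4⟩ := ih (PySem.Dict.get? d k) (List.Pairwise.of_cons hp)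
      refine ⟨k :: cons', ?_, ?_, ?_, ?_⟩
      · simpa [pvAdvance, hk] using h1
      · intro x hx; rcases List.mem_cons.1 hx with rfl | hx
        · exact hk
        · exact h2 x hx
      · simpa [pvAdvance, hk] using h3
      · simpa [pvAdvance, hk] using h4
    · refine ⟨[], by simp [pvAdvance, hk], by simp, ?_, by simp [pvAdvance, hk]⟩
      simp only [pvAdvance, if_neg hk]
      intro x hx
      rcases List.mem_cons.1 hx with rfl | hx
      · omega
      · have := (List.pairwise_cons.1 hp).1 x hx
        omega
-- main loop invariant: A's fold over frames [a, b) with carried current prompt equals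
-- B's fold, provided cur is the value of the last consumed key and all consumed keys < a
lemma main_loop (d : PySem.Dict Int String) (ks : List Int) (hs : ks.Pairwise (· ≤ ·)) :
    ∀ (n : Nat) (a b : Int), (b - a).toNat = n →
    ∀ (res : PySem.Dict Int String) (cur : Option String) (pre rem : List Int),
      ks = pre ++ rem → (∀ k ∈ pre, k < a) →
      cur = pre.foldl (fun _ k => PySem.Dict.get? d k) none →
      ((PySem.List.pyRange a b 1).foldl (pvStepA d ks) (res, cur)).1 =
      ((PySem.List.pyRange a b 1).foldl (pvStepB d) (res, rem, cur)).1 := by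
  intro n
  induction n with
  | zero =>
    intro a b hn res cur pre rem _ _ _
    rw [PySem.List.pyRange_one_eq_nil (by omega)]; rfl
  | succ m ih =>
    intro a b hn res cur pre rem hks hpre hcur
    have hab : a < b := by omega
    rw [PySem.List.pyRange_one_cons hab]
    simp only [List.foldl_cons]
    have hrem : rem.Pairwise (· ≤ ·) := (hks ▸ hs).sublist (List.sublist_append_right pre rem)
    obtain ⟨consumed, h1, h2, h3, h4⟩ := advance_spec d a rem cur hrem
    set p := pvAdvance d a rem cur with hpdef
    -- A's newly computed current prompt equals B's
    have hpre_fold :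
        pre.foldl (fun c kf => if kf ≤ a then PySem.Dict.get? d kf else c) cur = cur := by
      rw [foldl_cond_all_le d a pre cur (fun k hk => le_of_lt (hpre k hk))]
      by_cases hp0 : pre = []
      · subst hp0; simp at hcur; simp [hcur]
      · rw [foldl_ignore_acc d pre cur none hp0, ← hcur]
    have hcureq :
        ks.foldl (fun c kf => if kf ≤ a then PySem.Dict.get? d kf else c) cur =
        p.2 := by
      rw [hks, List.foldl_append, hpre_fold, h1, List.foldl_append,
        foldl_cond_all_le d a consumed cur h2,
        foldl_cond_all_gt d a _ _ h3, h4]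
    -- one synchronized step, then recurse with the extended consumed prefix
    simp only [pvStepA, pvStepB]
    rw [← hpdef, hcureq]
    exact ih (a + 1) b (by omega)
      (pvTruthySet res a p.2) p.2
      (pre ++ consumed) p.1
      (by rw [hks, h1, List.append_assoc])
      (by intro k hk; rcases List.mem_append.1 hk with hk | hk
          · exact lt_trans (hpre k hk) (by omega)
          · exact lt_of_le_of_lt (h2 k hk) (by omega))
      (by rw [List.foldl_append, ← hcur, h4])

-- with no keys left and no current prompt, B's loop never changes the result dict
lemma bloop_nil (d : PySem.Dict Int String) :
    ∀ (frames : List Int) (res : PySem.Dict Int String),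
      (frames.foldl (pvStepB d) (res, [], none)).1 = res := by
  intro frames
  induction frames with
  | nil => intro res; rfl
  | cons i rest ih => intro res; simpa [pvStepB, pvAdvance, pvTruthySet] using ih res

-- ===== VERDICT (by name: the statement is the Claim_ definition above) =====
theorem expand_prompts_py_spec : Claim_equal_expand_prompts_py := by
  intro prompts num_frames _
  unfold Spec_expand_prompts_py expand_prompts_py expand_prompts_py_alt
  by_cases hp : prompts = []
  · simp only [hp]
    have : PySem.List.sorted (PySem.Dict.keys (PySem.Dict.mk ([] : List (Int × String)))) (fun k => k) false = [] := rfl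
    rw [this, bloop_nil]
    rfl
  · simp only [if_neg hp]
    rw [main_loop (PySem.Dict.mk prompts)
      (PySem.List.sorted (PySem.Dict.keys (PySem.Dict.mk prompts)) (fun k => k) false)
      (PySem.List.sorted_pairwise _ _) ((num_frames - 0).toNat) 0 num_frames rfl
      PySem.Dict.empty none [] _ rfl (by simp) rfl]
    rfl
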